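-- pv_equiv track=rewrite | github.com/manas-17045/LeetcodeSolutions | 793/793_2.py | preimageSizeFZF
-- ===== SOURCE A (Python) =====
-- def preimageSizeFZF(k: int) -> int:
--     """
--     Calculates the number of non-negative integers x such that the number of trailing zeros in x! is equal to k.
--     :param k: An integer representing the target number of trailing zeros.
--     :return: The count of non-negative integers x whose factorial has exactly k trailing zeros.
--     """
--     def trailingZeros(x: int) -> int:
--         cnt = 0
--         while x:
--             x //= 5
--             cnt += x
--         return cnt
--
--     def firstWithAtLeast(target: int) -> int:
--         lo, hi = 0, 5 * (target + 1)
--         while lo < hi: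
--             mid = (lo + hi) // 2
--             if trailingZeros(mid) >= target:
--                 hi = mid
--             else:
--                 lo = mid + 1
--         return lo
--
--     return firstWithAtLeast(k + 1) - firstWithAtLeast(k)
-- ===== SOURCE B (Python) =====
-- def preimageSizeFZF(k: int) -> int:
--     """
--     Counts non-negative x whose factorial has exactly k trailing zeros, without
--     any binary search: trailing-zero counts are exactly the sums sum d_i*T_i
--     with digits 0 <= d_i <= 4 over the "coin" values T_1=1, T_{i+1}=5*T_i+1
--     (T_i = trailing zeros of (5^i)!), and such a representation, when it
--     exists, corresponds to exactly 5 values of x.  A greedy digit extraction,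
--     largest coin first capped at 4, decides representability.
--     """
--     coins = []
--     t = 1
--     while t <= k:
--         coins.append(t)
--         t = 5 * t + 1
--     rem = k
--     for c in reversed(coins):
--         rem -= min(rem // c, 4) * c
--     return 5 if rem == 0 else 0
-- ===== Notes on version B (the rewrite author's own statement) =====
-- stated objective: alternative
-- what changed: Replaces A's two binary searches over trailingZeros by a number-theoretic greedy: trailing-zero counts are exactly the sums of 'coins' T_1=1, T_{i+1}=5*T_i+1 with digits 0..4, so B extracts digits greedily (largest coin first, capped at 4) and returns 5 iff the remainder is 0 — no binary search and no trailingZeros evaluation at all.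
import Mathlib
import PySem

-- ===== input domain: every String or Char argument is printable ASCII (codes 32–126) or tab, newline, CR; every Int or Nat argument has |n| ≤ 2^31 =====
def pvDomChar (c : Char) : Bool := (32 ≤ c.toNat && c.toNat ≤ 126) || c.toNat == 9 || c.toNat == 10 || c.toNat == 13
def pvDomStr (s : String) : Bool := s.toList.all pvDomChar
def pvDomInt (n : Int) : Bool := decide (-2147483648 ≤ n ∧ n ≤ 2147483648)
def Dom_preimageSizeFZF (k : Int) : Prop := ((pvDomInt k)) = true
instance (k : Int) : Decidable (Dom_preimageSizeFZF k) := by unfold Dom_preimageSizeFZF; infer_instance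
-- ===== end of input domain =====

-- B replaces A's two binary searches over trailingZeros by a greedy digit
-- extraction over the coin values T_1 = 1, T_{i+1} = 5*T_i + 1 (objective: alternative).

-- ===== PORT A =====
-- trailingZeros: `cnt = 0; while x: x //= 5; cnt += x; return cnt`.
-- Python's `while x` diverges for x < 0; every call site passes a nonnegative
-- argument, on which this port is exact (guard `0 < x` = Python's `while x` there).
def pvTzA (x : Int) : Int :=
  if _h : 0 < x then
    PySem.Int.floordiv x 5 + pvTzA (PySem.Int.floordiv x 5)
  else 0
termination_by x.toNat
decreasing_by
  rw [PySem.Int.floordiv_eq_ediv_of_pos (by omega)]; omega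

-- `while lo < hi: mid = (lo+hi)//2; if trailingZeros(mid) >= target: hi = mid else lo = mid+1`
def pvFwalLoop (target lo hi : Int) : Int :=
  if _h : lo < hi then
    if target ≤ pvTzA (PySem.Int.floordiv (lo + hi) 2) then
      pvFwalLoop target lo (PySem.Int.floordiv (lo + hi) 2)
    else
      pvFwalLoop target (PySem.Int.floordiv (lo + hi) 2 + 1) hi
  else lo
termination_by (hi - lo).toNat
decreasing_by
  all_goals rw [PySem.Int.floordiv_eq_ediv_of_pos (by omega)]; omega

def pvFirstWithAtLeast (target : Int) : Int :=
  pvFwalLoop target 0 (5 * (target + 1))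

def preimageSizeFZF (k : Int) : Int :=
  pvFirstWithAtLeast (k + 1) - pvFirstWithAtLeast k

-- ===== PORT B =====
-- `coins = []; t = 1; while t <= k: coins.append(t); t = 5*t+1`.
-- The conjunct `1 ≤ t` is a totality guard only: t starts at 1 and 5*t+1 keeps it ≥ 1,
-- so on every reachable call it is true and the guard equals Python's `t <= k`.
def pvCoinsB (k t : Int) : List Int :=
  if h : 1 ≤ t ∧ t ≤ k then t :: pvCoinsB k (5 * t + 1) else []
termination_by (k + 1 - t).toNat
decreasing_by omega

-- one step of `for c in reversed(coins): rem -= min(rem // c, 4) * c`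
def pvStep (r c : Int) : Int := r - min (PySem.Int.floordiv r c) 4 * c

def preimageSizeFZF_alt (k : Int) : Int :=
  if (pvCoinsB k 1).reverse.foldl pvStep k = 0 then 5 else 0

-- ===== PRECONDITION & SPEC =====
def Spec_preimageSizeFZF (k : Int) (out : Int) : Prop := out = preimageSizeFZF_alt k
instance (k : Int) (out : Int) : Decidable (Spec_preimageSizeFZF k out) := by unfold Spec_preimageSizeFZF; infer_instance

-- ===== CLAIM (what is proved, stated in full; the proofs are below) =====
def Claim_equal_preimageSizeFZF : Prop := ∀ (k : Int), Dom_preimageSizeFZF k → Spec_preimageSizeFZF k (preimageSizeFZF k)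

-- ===== LEMMAS AND PROOFS =====

-- ---------- A side: the binary search finds the least x with tz(x) ≥ k ----------

theorem pvTzA_nonneg (x : Int) : 0 ≤ pvTzA x := by
  fun_induction pvTzA x with
  | case1 x h ih =>
    have : 0 ≤ PySem.Int.floordiv x 5 := by
      rw [PySem.Int.floordiv_eq_ediv_of_pos (by omega)]; omega
    omega
  | case2 x h => omega

-- the unfolding equation holds for all nonnegative x (including 0)
theorem pvTzA_fdiv (x : Int) (hx : 0 ≤ x) :
    pvTzA x = PySem.Int.floordiv x 5 + pvTzA (PySem.Int.floordiv x 5) := by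
  rcases lt_or_eq_of_le hx with h | h
  · rw [pvTzA]; simp [h]
  · rw [← h]
    have h0 : PySem.Int.floordiv (0:Int) 5 = 0 := by
      rw [PySem.Int.floordiv_eq_ediv_of_pos (by omega)]; simp
    rw [h0, pvTzA]; simp

theorem pvTzA_mono {x y : Int} (h : x ≤ y) : pvTzA x ≤ pvTzA y := by
  by_cases hx : 0 < x
  · have hy : 0 < y := by omega
    rw [pvTzA_fdiv x (by omega), pvTzA_fdiv y (by omega)]
    have hdiv : PySem.Int.floordiv x 5 ≤ PySem.Int.floordiv y 5 := by
      rw [PySem.Int.floordiv_eq_ediv_of_pos (by omega),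
          PySem.Int.floordiv_eq_ediv_of_pos (by omega)]
      omega
    have hrec := pvTzA_mono hdiv
    omega
  · rw [pvTzA, dif_neg hx]; exact pvTzA_nonneg y
termination_by y.toNat
decreasing_by rw [PySem.Int.floordiv_eq_ediv_of_pos (by omega)]; omega

-- tz is constant on each block [5m, 5m+4]
theorem pvTzA_block {m x : Int} (hm : 0 ≤ m) (h1 : 5 * m ≤ x) (h2 : x < 5 * m + 5) :
    pvTzA x = m + pvTzA m := by
  have h5 : PySem.Int.floordiv x 5 = m := by
    rw [PySem.Int.floordiv_eq_ediv_of_pos (by omega)]; omega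
  rw [pvTzA_fdiv x (by omega), h5]

-- binary-search loop specification
theorem pvFwalLoop_spec (t : Int) (lo hi : Int) :
    0 ≤ lo → lo ≤ hi → t ≤ pvTzA hi → (∀ x, 0 ≤ x → x < lo → pvTzA x < t) →
    lo ≤ pvFwalLoop t lo hi ∧ pvFwalLoop t lo hi ≤ hi ∧
    t ≤ pvTzA (pvFwalLoop t lo hi) ∧
    (∀ x, 0 ≤ x → x < pvFwalLoop t lo hi → pvTzA x < t) := by
  fun_induction pvFwalLoop t lo hi with
  | case1 lo hi h hc ih =>
    intro hlo hle hhi hinv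
    have hmid : lo ≤ PySem.Int.floordiv (lo + hi) 2 ∧ PySem.Int.floordiv (lo + hi) 2 < hi := by
      rw [PySem.Int.floordiv_eq_ediv_of_pos (by omega)]; omega
    obtain ⟨a, b, c, d⟩ := ih hlo hmid.1 hc hinv
    exact ⟨a, by omega, c, d⟩
  | case2 lo hi h hc ih =>
    intro hlo hle hhi hinv
    have hmid : lo ≤ PySem.Int.floordiv (lo + hi) 2 ∧ PySem.Int.floordiv (lo + hi) 2 < hi := by
      rw [PySem.Int.floordiv_eq_ediv_of_pos (by omega)]; omega
    obtain ⟨a, b, c, d⟩ := ih (by omega) (by omega) hhi (by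
      intro x hx hlt
      by_cases hxlo : x < lo
      · exact hinv x hx hxlo
      · have := pvTzA_mono (show x ≤ PySem.Int.floordiv (lo + hi) 2 by omega)
        omega)
    exact ⟨by omega, b, c, d⟩
  | case3 lo hi h =>
    intro hlo hle hhi hinv
    have : lo = hi := by omega
    exact ⟨le_refl _, by omega, this ▸ hhi, hinv⟩

-- specification of firstWithAtLeast for nonnegative targets
theorem pvFirst_spec (t : Int) (ht : 0 ≤ t) :
    0 ≤ pvFirstWithAtLeast t ∧ t ≤ pvTzA (pvFirstWithAtLeast t) ∧
    (∀ x, 0 ≤ x → x < pvFirstWithAtLeast t → pvTzA x < t) := by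
  have hhi : t ≤ pvTzA (5 * (t + 1)) := by
    have hb := pvTzA_block (m := t + 1) (x := 5 * (t + 1)) (by omega) (by omega) (by omega)
    have hn := pvTzA_nonneg (t + 1)
    omega
  obtain ⟨a, b, c, d⟩ := pvFwalLoop_spec t 0 (5 * (t + 1)) le_rfl (by
      have := pvTzA_nonneg (5 * (t + 1)); omega) hhi (by intro x hx hlt; omega)
  exact ⟨a, c, d⟩

theorem pvFirst_nonpos (t : Int) (ht : t ≤ 0) : pvFirstWithAtLeast t = 0 := by
  rcases lt_or_eq_of_le ht with h | h
  · rw [pvFirstWithAtLeast, pvFwalLoop, dif_neg (by omega)]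
  · subst h
    obtain ⟨a, c, d⟩ := pvFirst_spec 0 le_rfl
    by_contra hne
    have h0 : pvTzA 0 = 0 := by rw [pvTzA, dif_neg (by omega)]
    have := d 0 le_rfl (by omega)
    omega

-- A's value is 5 or 0 according to whether the least x with tz x ≥ k attains k
theorem pvA_char (k : Int) (hk : 0 ≤ k) :
    preimageSizeFZF k = if pvTzA (pvFirstWithAtLeast k) = k then 5 else 0 := by
  unfold preimageSizeFZF
  obtain ⟨a0, ageq, amin⟩ := pvFirst_spec k hk
  obtain ⟨b0, bgeq, bmin⟩ := pvFirst_spec (k + 1) (by omega)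
  set a := pvFirstWithAtLeast k with ha
  set b := pvFirstWithAtLeast (k + 1) with hb
  by_cases heq : pvTzA a = k
  · rw [if_pos heq]
    obtain ⟨m, hm0, ham⟩ : ∃ m, 0 ≤ m ∧ a = 5 * m := by
      refine ⟨a / 5, by omega, ?_⟩
      by_contra hr
      have hblk := pvTzA_block (m := a / 5) (x := a) (by omega) (by omega) (by omega)
      have hblk' := pvTzA_block (m := a / 5) (x := a - 1) (by omega) (by omega) (by omega)
      have := amin (a - 1) (by omega) (by omega)
      omega
    have htza : pvTzA a = m + pvTzA m := pvTzA_block hm0 (by omega) (by omega)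
    have h5 : pvTzA (a + 5) = (m + 1) + pvTzA (m + 1) :=
      pvTzA_block (by omega) (by omega) (by omega)
    have hmono := pvTzA_mono (show m ≤ m + 1 by omega)
    have hble : b ≤ a + 5 := by
      by_contra h2
      have := bmin (a + 5) (by omega) (by omega)
      omega
    have hbge : a + 5 ≤ b := by
      by_contra h2
      have hab : a ≤ b := by
        by_contra h3
        have := amin b b0 (by omega)
        omega
      have := pvTzA_block (m := m) (x := b) hm0 (by omega) (by omega)
      omega
    omega
  · rw [if_neg heq]
    have hab : b ≤ a := by
      by_contra h2
      have := bmin a a0 (by omega)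
      omega
    have hba : a ≤ b := by
      by_contra h2
      have := amin b b0 (by omega)
      omega
    omega

-- tz attains k at the least point iff it attains k at all
theorem tz_first_iff (k : Int) (hk : 0 ≤ k) :
    pvTzA (pvFirstWithAtLeast k) = k ↔ ∃ x, 0 ≤ x ∧ pvTzA x = k := by
  obtain ⟨a0, ageq, amin⟩ := pvFirst_spec k hk
  constructor
  · intro h; exact ⟨_, a0, h⟩
  · rintro ⟨x, hx0, hxk⟩
    have hax : pvFirstWithAtLeast k ≤ x := by
      by_contra h
      have := amin x hx0 (by omega)
      omega
    have := pvTzA_mono hax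
    omega

-- ---------- B side: coin chains, digit sums and the greedy ----------

-- digits are base-5 digits
def pvDigs (ds : List Int) : Prop := ∀ d ∈ ds, 0 ≤ d ∧ d ≤ 4

-- dot product of a digit list against a coin list (truncating at the shorter)
def pvDot : List Int → List Int → Int
  | d :: ds, c :: cs => d * c + pvDot ds cs
  | _, _ => 0

-- digit sum against the ascending coin chain t, 5t+1, 25t+6, …
def pvUsum : List Int → Int → Int
  | [], _ => 0
  | d :: ds, t => d * t + pvUsum ds (5 * t + 1)

-- the coin value n steps up the chain from t
def pvWshift : Int → Nat → Int
  | t, 0 => t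
  | t, n + 1 => pvWshift (5 * t + 1) n

-- value of a little-endian base-5 digit list
def pvV : List Int → Int
  | [] => 0
  | d :: ds => d + 5 * pvV ds

-- ascending coin chain from t
def pvAC : Int → List Int → Prop
  | _, [] => True
  | t, c :: cs => c = t ∧ pvAC (5 * t + 1) cs

-- descending coin chain ending at t
inductive pvDCF (t : Int) : List Int → Prop
  | nil : pvDCF t []
  | one : pvDCF t [t]
  | cons (c : Int) (cs : List Int) : pvDCF t (c :: cs) → pvDCF t ((5 * c + 1) :: c :: cs)

-- the greedy decides representability on a descending chain
def pvGood (D : List Int) : Prop := ∀ r : Int, 0 ≤ r →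
  (D.foldl pvStep r = 0 ↔ ∃ ds, pvDigs ds ∧ ds.length = D.length ∧ r = pvDot ds D)

theorem coins_ac (k t : Int) : pvAC t (pvCoinsB k t) := by
  rw [pvCoinsB]
  split
  · exact ⟨rfl, coins_ac k (5 * t + 1)⟩
  · trivial
termination_by (k + 1 - t).toNat
decreasing_by omega

theorem coins_next (k t : Int) (ht : 1 ≤ t) : k < pvWshift t (pvCoinsB k t).length := by
  rw [pvCoinsB]
  split
  next h => simpa [pvWshift] using coins_next k (5 * t + 1) (by omega)
  next h => simp only [List.length_nil, pvWshift]; omega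
termination_by (k + 1 - t).toNat
decreasing_by omega

theorem dcf_snoc {t : Int} {L : List Int} (h : pvDCF (5 * t + 1) L) :
    pvDCF t (L ++ [t]) := by
  induction h with
  | nil => simpa using pvDCF.one
  | one => exact pvDCF.cons _ _ pvDCF.one
  | cons c cs _ ih => simpa using pvDCF.cons c (cs ++ [t]) (by simpa using ih)

theorem dcf_of_ac : ∀ (cs : List Int) (t : Int), pvAC t cs → pvDCF t cs.reverse := by
  intro cs
  induction cs with
  | nil => intro t _; exact pvDCF.nil
  | cons c cs ih =>
    rintro t ⟨rfl, hac⟩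
    simpa using dcf_snoc (ih _ hac)

theorem dcf_pos {t : Int} {D : List Int} (h : pvDCF t D) (ht : 1 ≤ t) :
    ∀ c ∈ D, 1 ≤ c := by
  induction h with
  | nil => simp
  | one => simpa using ht
  | cons c cs h ih =>
    intro x hx
    have hc : 1 ≤ c := ih c (by simp)
    rcases List.mem_cons.mp hx with rfl | hx
    · omega
    · exact ih x hx

theorem dcf_sum {t : Int} {D : List Int} (h : pvDCF t D) (ht : 1 ≤ t) :
    ∀ c cs, D = c :: cs → 4 * cs.sum < c := by
  induction h with
  | nil => intro c cs h; cases h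
  | one =>
    intro c cs h
    cases h
    simpa using ht
  | cons c0 cs0 h ih =>
    intro c cs h2
    cases h2
    have := ih c0 cs0 rfl
    simp only [List.sum_cons]
    omega

theorem pvDot_nil_right (ds : List Int) : pvDot ds [] = 0 := by
  cases ds <;> rfl

theorem pvDot_nonneg (ds cs : List Int) (hds : ∀ d ∈ ds, 0 ≤ d)
    (hcs : ∀ c ∈ cs, 0 ≤ c) : 0 ≤ pvDot ds cs := by
  induction ds generalizing cs with
  | nil => simp [pvDot]
  | cons d ds ih =>
    cases cs with
    | nil => simp [pvDot_nil_right]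
    | cons c cs =>
      have h1 : 0 ≤ d := hds d (by simp)
      have h2 : 0 ≤ c := hcs c (by simp)
      have h3 := ih cs (fun x hx => hds x (by simp [hx])) (fun x hx => hcs x (by simp [hx]))
      have h4 : 0 ≤ d * c := mul_nonneg h1 h2
      simp only [pvDot]
      omega

theorem pvDot_le (ds cs : List Int) (hds : ∀ d ∈ ds, 0 ≤ d ∧ d ≤ 4)
    (hcs : ∀ c ∈ cs, 0 ≤ c) : pvDot ds cs ≤ 4 * cs.sum := by
  induction cs generalizing ds with
  | nil => simp [pvDot_nil_right]
  | cons c cs ih =>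
    have hc : 0 ≤ c := hcs c (by simp)
    have hsum : 0 ≤ cs.sum := List.sum_nonneg (fun x hx => hcs x (by simp [hx]))
    cases ds with
    | nil => simp only [pvDot, List.sum_cons]; nlinarith
    | cons d ds =>
      have hd := hds d (by simp)
      have hdc : d * c ≤ 4 * c := mul_le_mul_of_nonneg_right hd.2 hc
      have := ih ds (fun x hx => hds x (by simp [hx])) (fun x hx => hcs x (by simp [hx]))
      simp only [pvDot, List.sum_cons]
      omega

theorem pvGood_nil : pvGood [] := by
  intro r hr
  simp only [List.foldl_nil]
  constructor
  · intro h
    exact ⟨[], by simp [pvDigs], rfl, by simpa [pvDot] using h⟩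
  · rintro ⟨ds, _, hlen, hdot⟩
    cases ds with
    | nil => simpa [pvDot] using hdot
    | cons d ds => simp at hlen

theorem pvGood_cons (c : Int) (cs : List Int) (hc : 1 ≤ c)
    (hsum : 4 * cs.sum < c) (hcs : ∀ x ∈ cs, 1 ≤ x) (hg : pvGood cs) :
    pvGood (c :: cs) := by
  intro r hr
  have hcpos : (0:Int) < c := hc
  have hfd : PySem.Int.floordiv r c = r / c := PySem.Int.floordiv_eq_ediv_of_pos hcpos
  have hq0 : 0 ≤ r / c := Int.ediv_nonneg hr (le_of_lt hcpos)
  have hmod : r % c + c * (r / c) = r := Int.emod_add_mul_ediv r c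
  have hm0 : 0 ≤ r % c := Int.emod_nonneg r (ne_of_gt hcpos)
  have hmlt : r % c < c := Int.emod_lt_of_pos r hcpos
  have hstep : pvStep r c = r - min (r / c) 4 * c := by simp [pvStep, hfd]
  have hd0 : 0 ≤ min (r / c) 4 := le_min hq0 (by norm_num)
  have hd4 : min (r / c) 4 ≤ 4 := min_le_right _ _
  have hdq : min (r / c) 4 ≤ r / c := min_le_left _ _
  have hr' : 0 ≤ r - min (r / c) 4 * c := by
    have h1 : min (r / c) 4 * c ≤ (r / c) * c := mul_le_mul_of_nonneg_right hdq (le_of_lt hcpos)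
    nlinarith
  have hfold : (c :: cs).foldl pvStep r = cs.foldl pvStep (r - min (r / c) 4 * c) := by
    simp [List.foldl_cons, hstep]
  rw [hfold]
  constructor
  · intro h
    obtain ⟨ds, hds, hlen, hdot⟩ := (hg _ hr').1 h
    refine ⟨min (r / c) 4 :: ds, ?_, by simp [hlen], ?_⟩
    · intro x hx
      rcases List.mem_cons.mp hx with rfl | hx
      · exact ⟨hd0, hd4⟩
      · exact hds x hx
    · simp only [pvDot]
      omega
  · rintro ⟨ds, hds, hlen, hdot⟩
    cases ds with
    | nil => simp at hlen
    | cons e ds₂ =>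
      have he := hds e (by simp)
      have hds₂ : ∀ d ∈ ds₂, 0 ≤ d ∧ d ≤ 4 := fun x hx => hds x (by simp [hx])
      have hs0 : 0 ≤ pvDot ds₂ cs :=
        pvDot_nonneg ds₂ cs (fun x hx => (hds₂ x hx).1) (fun x hx => by have := hcs x hx; omega)
      have hslt : pvDot ds₂ cs < c :=
        lt_of_le_of_lt (pvDot_le ds₂ cs hds₂ (fun x hx => by have := hcs x hx; omega)) hsum
      have hre : r = e * c + pvDot ds₂ cs := by simpa [pvDot] using hdot
      have hqe : r / c = e := by
        rw [hre, show e * c + pvDot ds₂ cs = pvDot ds₂ cs + e * c from by ring,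
            Int.add_mul_ediv_right _ _ (ne_of_gt hcpos),
            Int.ediv_eq_zero_of_lt hs0 hslt]
        simp
      have hde : min (r / c) 4 = e := by rw [hqe]; exact min_eq_left he.2
      apply (hg _ hr').2
      refine ⟨ds₂, hds₂, by simpa using hlen, ?_⟩
      rw [hde, hre]
      ring

theorem good_of_dcf {D : List Int} (h : pvDCF 1 D) : pvGood D := by
  induction h with
  | nil => exact pvGood_nil
  | one => exact pvGood_cons 1 [] le_rfl (by simp) (by simp) pvGood_nil
  | cons c cs h ih =>
    have hcpos : 1 ≤ c := dcf_pos h le_rfl c (by simp)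
    have hsum := dcf_sum h le_rfl c cs rfl
    have hall : ∀ x ∈ c :: cs, 1 ≤ x := dcf_pos h le_rfl
    exact pvGood_cons (5 * c + 1) (c :: cs) (by omega)
      (by simp only [List.sum_cons]; omega) hall ih

-- dot product commutes with simultaneous reversal
theorem pvDot_snoc (as bs : List Int) (x y : Int) (h : as.length = bs.length) :
    pvDot (as ++ [x]) (bs ++ [y]) = pvDot as bs + x * y := by
  induction as generalizing bs with
  | nil =>
    cases bs with
    | nil => simp [pvDot]
    | cons b bs => simp at h
  | cons a as ih =>
    cases bs with
    | nil => simp at h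
    | cons b bs =>
      have hl : as.length = bs.length := by simpa using h
      simp only [List.cons_append, pvDot, ih bs hl]
      ring

theorem pvDot_rev (ds cs : List Int) (h : ds.length = cs.length) :
    pvDot ds.reverse cs.reverse = pvDot ds cs := by
  induction ds generalizing cs with
  | nil =>
    cases cs with
    | nil => rfl
    | cons c cs => simp at h
  | cons d ds ih =>
    cases cs with
    | nil => simp at h
    | cons c cs =>
      have hl : ds.length = cs.length := by simpa using h
      simp only [List.reverse_cons, pvDot_snoc ds.reverse cs.reverse d c (by simpa using hl),
        ih cs hl, pvDot]
      ring

-- dot against an ascending chain is the chain digit sum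
theorem adot_usum : ∀ (cs : List Int) (t : Int), pvAC t cs →
    ∀ ds : List Int, ds.length = cs.length → pvDot ds cs = pvUsum ds t := by
  intro cs
  induction cs with
  | nil =>
    intro t _ ds hlen
    rw [List.length_nil, List.length_eq_zero_iff] at hlen
    subst hlen; rfl
  | cons c cs ih =>
    rintro t ⟨rfl, hac⟩ ds hlen
    cases ds with
    | nil => simp at hlen
    | cons d ds =>
      simp only [pvDot, pvUsum, ih _ hac ds (by simpa using hlen)]

-- ---------- digit sums, values and trailing zeros ----------

theorem pvUsum_nonneg (ds : List Int) : ∀ t : Int, (∀ d ∈ ds, 0 ≤ d) → 0 ≤ t →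
    0 ≤ pvUsum ds t := by
  induction ds with
  | nil => intro t _ _; simp [pvUsum]
  | cons d ds ih =>
    intro t hds ht
    have h1 : 0 ≤ d := hds d (by simp)
    have h2 := ih (5 * t + 1) (fun x hx => hds x (by simp [hx])) (by omega)
    have h3 : 0 ≤ d * t := mul_nonneg h1 ht
    simp only [pvUsum]
    omega

theorem pvUsum_append (ds es : List Int) : ∀ t : Int,
    pvUsum (ds ++ es) t = pvUsum ds t + pvUsum es (pvWshift t ds.length) := by
  induction ds with
  | nil => intro t; simp [pvUsum, pvWshift]
  | cons d ds ih =>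
    intro t
    simp only [List.cons_append, pvUsum, List.length_cons, pvWshift, ih (5 * t + 1)]
    ring

theorem pvUsum_replicate (n : Nat) : ∀ t : Int, pvUsum (List.replicate n 0) t = 0 := by
  induction n with
  | zero => intro t; simp [pvUsum]
  | succ n ih => intro t; simp [List.replicate_succ, pvUsum, ih]

theorem pvWshift_pos (n : Nat) : ∀ t : Int, 1 ≤ t → 1 ≤ pvWshift t n := by
  induction n with
  | zero => intro t ht; simpa [pvWshift] using ht
  | succ n ih => intro t ht; exact ih (5 * t + 1) (by omega)

theorem pvUsum_lt_zero (ds : List Int) : ∀ t : Int, 1 ≤ t → (∀ d ∈ ds, 0 ≤ d) →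
    pvUsum ds t < t → pvUsum ds t = 0 := by
  induction ds with
  | nil => intro t _ _ _; rfl
  | cons d ds ih =>
    intro t ht hds hlt
    have hd : 0 ≤ d := hds d (by simp)
    have hrec : 0 ≤ pvUsum ds (5 * t + 1) :=
      pvUsum_nonneg ds (5 * t + 1) (fun x hx => hds x (by simp [hx])) (by omega)
    have hd0 : d = 0 := by
      by_contra h
      have h1 : 1 ≤ d := by omega
      have : t ≤ d * t := le_mul_of_one_le_left (by omega) h1
      simp only [pvUsum] at hlt
      omega
    subst hd0
    simp only [pvUsum, zero_mul, zero_add] at hlt ⊢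
    exact ih (5 * t + 1) (by omega) (fun x hx => hds x (by simp [hx])) (by omega)

-- a representation of k can be resized to exactly the length of k's coin list
theorem rep_resize (k : Int) (n : Nat) (hn : k < pvWshift 1 n)
    (ds : List Int) (hds : pvDigs ds) (hus : pvUsum ds 1 = k) :
    ∃ ds', pvDigs ds' ∧ ds'.length = n ∧ pvUsum ds' 1 = k := by
  by_cases hm : ds.length ≤ n
  · refine ⟨ds ++ List.replicate (n - ds.length) 0, ?_, by simp; omega, ?_⟩
    · intro x hx
      rcases List.mem_append.mp hx with hx | hx
      · exact hds x hx
      · have := List.eq_of_mem_replicate hx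
        omega
    · rw [pvUsum_append, pvUsum_replicate, hus]
      ring
  · have hlen : (ds.take n).length = n := by simp; omega
    have hdtake : pvDigs (ds.take n) := fun x hx => hds x (List.mem_of_mem_take hx)
    have hddrop : ∀ d ∈ ds.drop n, 0 ≤ d := fun x hx => (hds x (List.mem_of_mem_drop hx)).1
    have hsplit := List.take_append_drop n ds
    have heq : pvUsum ds 1 =
        pvUsum (ds.take n) 1 + pvUsum (ds.drop n) (pvWshift 1 n) := by
      conv_lhs => rw [← hsplit]
      rw [pvUsum_append, hlen]
    have h1 : 0 ≤ pvUsum (ds.take n) 1 :=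
      pvUsum_nonneg _ 1 (fun x hx => (hdtake x hx).1) (by norm_num)
    have h2 : 0 ≤ pvUsum (ds.drop n) (pvWshift 1 n) :=
      pvUsum_nonneg _ _ hddrop (by have := pvWshift_pos n 1 le_rfl; omega)
    have h3 : pvUsum (ds.drop n) (pvWshift 1 n) < pvWshift 1 n := by omega
    have h4 := pvUsum_lt_zero (ds.drop n) (pvWshift 1 n) (pvWshift_pos n 1 le_rfl) hddrop h3
    exact ⟨ds.take n, hdtake, hlen, by omega⟩

theorem pvV_nonneg (ds : List Int) (hds : ∀ d ∈ ds, 0 ≤ d) : 0 ≤ pvV ds := by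
  induction ds with
  | nil => simp [pvV]
  | cons d ds ih =>
    have h1 : 0 ≤ d := hds d (by simp)
    have h2 := ih (fun x hx => hds x (by simp [hx]))
    simp only [pvV]
    omega

theorem pvUsum_shift (ds : List Int) : ∀ u : Int,
    pvUsum ds u = u * pvV ds + pvUsum ds 0 := by
  induction ds with
  | nil => intro u; simp [pvUsum, pvV]
  | cons d ds ih =>
    intro u
    simp only [pvUsum, pvV]
    rw [ih (5 * u + 1), ih (5 * 0 + 1)]
    ring

theorem tz_v (ds : List Int) (hds : pvDigs ds) : pvTzA (pvV ds) = pvUsum ds 0 := by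
  induction ds with
  | nil =>
    have : pvTzA 0 = 0 := by rw [pvTzA, dif_neg (by omega)]
    simpa [pvV, pvUsum] using this
  | cons d ds ih =>
    have hd := hds d (by simp)
    have hds' : pvDigs ds := fun x hx => hds x (by simp [hx])
    have hv0 : 0 ≤ pvV ds := pvV_nonneg ds (fun x hx => (hds' x hx).1)
    have hblock := pvTzA_block (m := pvV ds) (x := d + 5 * pvV ds) hv0 (by omega) (by omega)
    rw [show pvV (d :: ds) = d + 5 * pvV ds from rfl, hblock, ih hds']
    have h1 := pvUsum_shift ds 1
    show pvV ds + pvUsum ds 0 = pvUsum (d :: ds) 0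
    simp only [pvUsum]
    norm_num
    rw [h1]
    ring

theorem pvDecomp : ∀ (n : Nat) (x : Int), 0 ≤ x → x.toNat ≤ n →
    ∃ ds, pvDigs ds ∧ pvV ds = x := by
  intro n
  induction n with
  | zero =>
    intro x hx h0
    have : x = 0 := by omega
    exact ⟨[], by simp [pvDigs], by simp [pvV, this]⟩
  | succ n ih =>
    intro x hx hle
    by_cases h0 : x = 0
    · exact ⟨[], by simp [pvDigs], by simp [pvV, h0]⟩
    · obtain ⟨ds, hds, hv⟩ := ih (x / 5) (by omega) (by omega)
      refine ⟨x % 5 :: ds, ?_, ?_⟩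
      · intro d hd
        rcases List.mem_cons.mp hd with rfl | hd
        · omega
        · exact hds d hd
      · simp only [pvV, hv]
        omega

-- representability by some digit list = achievability as a trailing-zero count
theorem anyrep_iff (k : Int) :
    (∃ ds, pvDigs ds ∧ pvUsum ds 1 = k) ↔ ∃ x, 0 ≤ x ∧ pvTzA x = k := by
  constructor
  · rintro ⟨ds, hds, hus⟩
    have hds0 : pvDigs (0 :: ds) := by
      intro x hx
      rcases List.mem_cons.mp hx with rfl | hx
      · omega
      · exact hds x hx
    refine ⟨pvV (0 :: ds), pvV_nonneg _ (fun x hx => (hds0 x hx).1), ?_⟩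
    rw [tz_v _ hds0]
    simpa [pvUsum] using hus
  · rintro ⟨x, hx0, hxk⟩
    obtain ⟨ds, hds, hv⟩ := pvDecomp x.toNat x hx0 le_rfl
    have hus : pvUsum ds 0 = k := by rw [← tz_v ds hds, hv, hxk]
    cases ds with
    | nil => exact ⟨[], by simp [pvDigs], by simpa [pvUsum] using hus⟩
    | cons d ds₂ =>
      refine ⟨ds₂, fun x hx => hds x (by simp [hx]), ?_⟩
      simpa [pvUsum] using hus

-- B's greedy succeeds exactly on achievable k (for k ≥ 0)
theorem pvB_main (k : Int) (hk : 0 ≤ k) :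
    ((pvCoinsB k 1).reverse.foldl pvStep k = 0) ↔ ∃ x, 0 ≤ x ∧ pvTzA x = k := by
  have hac : pvAC 1 (pvCoinsB k 1) := coins_ac k 1
  have hnext : k < pvWshift 1 (pvCoinsB k 1).length := coins_next k 1 le_rfl
  have hgood : pvGood (pvCoinsB k 1).reverse := good_of_dcf (dcf_of_ac _ 1 hac)
  rw [hgood k hk]
  constructor
  · rintro ⟨ds, hds, hlen, hdot⟩
    have hlen' : ds.reverse.length = (pvCoinsB k 1).length := by simpa using hlen
    have hrev : pvDot ds.reverse (pvCoinsB k 1) = pvDot ds (pvCoinsB k 1).reverse := by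
      have := pvDot_rev ds (pvCoinsB k 1).reverse (by simpa using hlen)
      simpa using this
    have hus : pvUsum ds.reverse 1 = k := by
      rw [← adot_usum _ 1 hac ds.reverse hlen', hrev, ← hdot]
    exact (anyrep_iff k).mp ⟨ds.reverse, fun x hx => hds x (List.mem_reverse.mp hx), hus⟩
  · intro hach
    obtain ⟨ds, hds, hus⟩ := (anyrep_iff k).mpr hach
    obtain ⟨ds', hds', hlen', hus'⟩ :=
      rep_resize k (pvCoinsB k 1).length hnext ds hds hus
    refine ⟨ds'.reverse, fun x hx => hds' x (List.mem_reverse.mp hx), by simpa using hlen', ?_⟩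
    have hdot' : pvDot ds' (pvCoinsB k 1) = k := by
      rw [adot_usum _ 1 hac ds' hlen', hus']
    have := pvDot_rev ds' (pvCoinsB k 1) hlen'
    omega

-- ===== VERDICT (by name: the statement is the Claim_ definition above) =====
theorem preimageSizeFZF_spec : Claim_equal_preimageSizeFZF := by
  intro k _
  unfold Spec_preimageSizeFZF
  by_cases hk : 0 ≤ k
  · rw [pvA_char k hk]
    unfold preimageSizeFZF_alt
    have h := (pvB_main k hk).trans (tz_first_iff k hk).symm
    by_cases h0 : (pvCoinsB k 1).reverse.foldl pvStep k = 0
    · rw [if_pos h0, if_pos (h.mp h0)]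
    · rw [if_neg h0, if_neg (fun hx => h0 (h.mpr hx))]
  · have hA : preimageSizeFZF k = 0 := by
      unfold preimageSizeFZF
      rw [pvFirst_nonpos k (by omega), pvFirst_nonpos (k + 1) (by omega)]
      ring
    have hcs : pvCoinsB k 1 = [] := by
      rw [pvCoinsB, dif_neg (by omega)]
    rw [hA]
    unfold preimageSizeFZF_alt
    rw [hcs]
    simp only [List.reverse_nil, List.foldl_nil]
    rw [if_neg (by omega)]
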